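-- pv_equiv track=rewrite | github.com/Maggie-rhino/Leecode-Algorithm | Bind75/649/solution.py | predictPartyVictory
-- ===== SOURCE A (Python) =====
-- def predictPartyVictory(senate: str) -> str:
-- 	queue_d = []
-- 	queue_r =[]
-- 	l = len(senate)
-- 	# step 1:seperate two team members
-- 	for i in range(l):
-- 		if senate[i]=="R":
-- 			queue_r.append(i)
-- 		else:
-- 			queue_d.append(i)
--
-- 	# compare
-- 	while (len(queue_d)>0) and (len(queue_r)>0):
-- 		d_1st = queue_d.pop(0)
-- 		r_1st =queue_r.pop(0)
-- 		if d_1st > r_1st: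
-- 			#  then d will be banned, r will be appended to the end of the queue
-- 			queue_r.append(r_1st+l)
-- 		else:
-- 			queue_d.append(d_1st+l)
--
-- 	return "Dire" if len(queue_d) else "Radiant"
-- ===== SOURCE B (Python) =====
-- def predictPartyVictory(senate: str) -> str:
--     # One FIFO queue of party flags (True = Radiant senator); each round the
--     # front senator bans the first senator of the other party and re-queues.
--     q = [c == 'R' for c in senate]
--     while (True in q) and (False in q):
--         x = q.pop(0)
--         q.remove(not x)
--         q.append(x)
--     return "Dire" if False in q else "Radiant"
-- ===== Notes on version B (the rewrite author's own statement) =====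
-- stated objective: simpler
-- what changed: A keeps two queues of senator indices, compares the two fronts and re-queues the winner's index shifted by len(senate); B keeps a single FIFO queue of party flags with no indices at all: the front senator removes the first senator of the other party and goes to the back.
import Mathlib
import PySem

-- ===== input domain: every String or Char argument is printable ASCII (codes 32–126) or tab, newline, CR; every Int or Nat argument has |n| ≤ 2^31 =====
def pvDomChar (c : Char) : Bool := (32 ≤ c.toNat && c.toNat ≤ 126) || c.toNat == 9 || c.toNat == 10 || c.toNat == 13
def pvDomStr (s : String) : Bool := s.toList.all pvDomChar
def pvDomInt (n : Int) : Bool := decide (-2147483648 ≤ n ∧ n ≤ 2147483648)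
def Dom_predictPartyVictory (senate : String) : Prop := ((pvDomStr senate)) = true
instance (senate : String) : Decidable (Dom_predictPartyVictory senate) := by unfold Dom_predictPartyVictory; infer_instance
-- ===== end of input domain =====

-- B replaces A's two index queues (compare fronts, re-queue winner's index + l) by a single
-- FIFO queue of party flags with eager removal of the banned senator: simpler, same cost.

-- ===== PORT A =====
-- A's while loop: pop both fronts, smaller index wins and is re-appended shifted by l.
def loopA (l : Int) : List Int → List Int → String
  | [], _ => "Radiant"
  | _ :: _, [] => "Dire"
  | d :: ds, r :: rs =>
      if d > r then loopA l ds (rs ++ [r + l]) else loopA l (ds ++ [d + l]) rs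
termination_by qd qr => qd.length + qr.length
decreasing_by all_goals (simp; try omega)

-- A's step-1 loop body: route index i to queue_r if senate[i]=='R', else to queue_d.
def stepA (q : List Int × List Int) (iv : Int × Char) : List Int × List Int :=
  if iv.2 == 'R' then (q.1, q.2 ++ [iv.1]) else (q.1 ++ [iv.1], q.2)

def predictPartyVictory (senate : String) : String :=
  let cs := senate.toList
  let l : Int := cs.length
  let q := (PySem.List.enumerate cs 0).foldl stepA ([], [])
  loopA l q.1 q.2

-- ===== PORT B =====
-- B's while loop: pop the front flag, remove the first opposite flag, re-append the front.
def loopB : List Bool → String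
  | [] => "Radiant"
  | x :: rest =>
      if h : (x :: rest).contains true && (x :: rest).contains false then
        loopB (rest.erase (!x) ++ [x])
      else if (x :: rest).contains false then "Dire" else "Radiant"
termination_by q => q.length
decreasing_by
  have hx : (!x) ∈ rest := by cases x <;> simp_all
  have h1 : 0 < rest.length := List.length_pos_of_mem hx
  simp [hx]
  omega

def predictPartyVictory_alt (senate : String) : String :=
  loopB (senate.toList.map (fun c => c == 'R'))

-- ===== PRECONDITION & SPEC =====
def Spec_predictPartyVictory (senate : String) (out : String) : Prop := out = predictPartyVictory_alt senate
instance (senate : String) (out : String) : Decidable (Spec_predictPartyVictory senate out) := by unfold Spec_predictPartyVictory; infer_instance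

-- ===== CLAIM (what is proved, stated in full; the proofs are below) =====
def Claim_equal_predictPartyVictory : Prop := ∀ (senate : String), Dom_predictPartyVictory senate → Spec_predictPartyVictory senate (predictPartyVictory senate)

-- ===== LEMMAS AND PROOFS =====

-- Sorted merge of the two index queues into the sequence of party flags (false = Dire).
def mergeL : List Int → List Int → List Bool
  | [], qr => qr.map (fun _ => true)
  | qd, [] => qd.map (fun _ => false)
  | d :: ds, r :: rs => if d < r then false :: mergeL ds (r :: rs) else true :: mergeL (d :: ds) rs
termination_by qd qr => qd.length + qr.length
decreasing_by all_goals (simp; try omega)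

theorem mergeL_nil_right (ds : List Int) : mergeL ds [] = ds.map (fun _ => false) := by
  cases ds <;> simp [mergeL]

theorem mem_false_mergeL (qd qr : List Int) : false ∈ mergeL qd qr ↔ qd ≠ [] := by
  induction qd, qr using mergeL.induct with
  | case1 qr => simp [mergeL]
  | case2 qd h =>
    cases qd with
    | nil => exact absurd rfl h
    | cons a as => simp [mergeL_nil_right]
  | case3 d ds r rs hdr ih => simp [mergeL, hdr]
  | case4 d ds r rs hdr ih => simp [mergeL, hdr, ih]

theorem mem_true_mergeL (qd qr : List Int) : true ∈ mergeL qd qr ↔ qr ≠ [] := by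
  induction qd, qr using mergeL.induct with
  | case1 qr => cases qr <;> simp [mergeL]
  | case2 qd h => cases qd with
    | nil => exact absurd rfl h
    | cons a as => simp [mergeL_nil_right]
  | case3 d ds r rs hdr ih => simp [mergeL, hdr, ih]
  | case4 d ds r rs hdr ih => simp [mergeL, hdr]

theorem erase_false_mergeL (d : Int) (ds rs : List Int) (h : ∀ y ∈ ds, d < y) :
    (mergeL (d :: ds) rs).erase false = mergeL ds rs := by
  induction rs with
  | nil => simp [mergeL_nil_right]
  | cons r' rs' ih =>
    by_cases hd : d < r'
    · simp [mergeL, hd]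
    · rw [show mergeL (d :: ds) (r' :: rs') = true :: mergeL (d :: ds) rs' by
        rw [mergeL]; simp [hd]]
      rw [List.erase_cons]
      simp only [show (true == false) = false by rfl, Bool.false_eq_true, if_false]
      rw [ih]
      cases ds with
      | nil => simp [mergeL]
      | cons d2 ds2 =>
        have h2 : ¬ d2 < r' := by have := h d2 (by simp); omega
        rw [show mergeL (d2 :: ds2) (r' :: rs') = true :: mergeL (d2 :: ds2) rs' by
          rw [mergeL]; simp [h2]]

theorem erase_true_mergeL (r : Int) (ds rs : List Int) (h : ∀ y ∈ rs, r < y) :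
    (mergeL ds (r :: rs)).erase true = mergeL ds rs := by
  induction ds with
  | nil => simp [mergeL]
  | cons d' ds' ih =>
    by_cases hd : d' < r
    · rw [show mergeL (d' :: ds') (r :: rs) = false :: mergeL ds' (r :: rs) by
        rw [mergeL]; simp [hd]]
      rw [List.erase_cons]
      simp only [show (false == true) = false by rfl, Bool.false_eq_true, if_false]
      rw [ih]
      cases rs with
      | nil => simp [mergeL_nil_right]
      | cons r2 rs2 =>
        have h2 : d' < r2 := by have := h r2 (by simp); omega
        rw [show mergeL (d' :: ds') (r2 :: rs2) = false :: mergeL ds' (r2 :: rs2) by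
          rw [mergeL]; simp [h2]]
    · rw [show mergeL (d' :: ds') (r :: rs) = true :: mergeL (d' :: ds') rs by
        rw [mergeL]; simp [hd]]
      rw [List.erase_cons]
      simp

theorem mergeL_append_left (m : Int) : ∀ (n : Nat) (ds rs : List Int),
    ds.length + rs.length ≤ n → (∀ y ∈ rs, y < m) →
    mergeL (ds ++ [m]) rs = mergeL ds rs ++ [false] := by
  intro n
  induction n with
  | zero =>
    intro ds rs hlen _
    have hd : ds = [] := by cases ds <;> simp_all
    have hr : rs = [] := by cases rs <;> simp_all
    subst hd; subst hr
    simp [mergeL_nil_right]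
  | succ n ih =>
    intro ds rs hlen h
    cases ds with
    | nil =>
      cases rs with
      | nil => simp [mergeL_nil_right]
      | cons r rs' =>
        have hm : ¬ m < r := by have := h r (by simp); omega
        rw [show ([] : List Int) ++ [m] = [m] by rfl]
        rw [show mergeL [m] (r :: rs') = true :: mergeL [m] rs' by
          rw [mergeL]; simp [hm]]
        have := ih [] rs' (by simp at hlen ⊢; omega) (fun y hy => h y (by simp [hy]))
        simp only [List.nil_append] at this
        rw [this]
        simp [mergeL]
    | cons d ds' =>
      cases rs with
      | nil => simp [mergeL_nil_right]
      | cons r rs' =>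
        by_cases hdr : d < r
        · have := ih ds' (r :: rs') (by simp at hlen ⊢; omega) h
          rw [show (d :: ds') ++ [m] = d :: (ds' ++ [m]) by rfl]
          rw [show mergeL (d :: (ds' ++ [m])) (r :: rs') = false :: mergeL (ds' ++ [m]) (r :: rs') by
            rw [mergeL]; simp [hdr]]
          rw [this]
          rw [show mergeL (d :: ds') (r :: rs') = false :: mergeL ds' (r :: rs') by
            rw [mergeL]; simp [hdr]]
          rfl
        · have := ih (d :: ds') rs' (by simp at hlen ⊢; omega) (fun y hy => h y (by simp [hy]))
          rw [show (d :: ds') ++ [m] = d :: (ds' ++ [m]) by rfl] at this ⊢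
          rw [show mergeL (d :: (ds' ++ [m])) (r :: rs') = true :: mergeL (d :: (ds' ++ [m])) rs' by
            rw [mergeL]; simp [hdr]]
          rw [this]
          rw [show mergeL (d :: ds') (r :: rs') = true :: mergeL (d :: ds') rs' by
            rw [mergeL]; simp [hdr]]
          rfl

theorem mergeL_append_right (m : Int) : ∀ (n : Nat) (ds rs : List Int),
    ds.length + rs.length ≤ n → (∀ y ∈ ds, y < m) →
    mergeL ds (rs ++ [m]) = mergeL ds rs ++ [true] := by
  intro n
  induction n with
  | zero =>
    intro ds rs hlen _
    have hd : ds = [] := by cases ds <;> simp_all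
    have hr : rs = [] := by cases rs <;> simp_all
    subst hd; subst hr
    simp [mergeL]
  | succ n ih =>
    intro ds rs hlen h
    cases ds with
    | nil => simp [mergeL]
    | cons d ds' =>
      cases rs with
      | nil =>
        have hm : d < m := h d (by simp)
        rw [show ([] : List Int) ++ [m] = [m] by rfl]
        rw [show mergeL (d :: ds') [m] = false :: mergeL ds' [m] by
          rw [mergeL]; simp [hm]]
        have := ih ds' [] (by simp at hlen ⊢; omega) (fun y hy => h y (by simp [hy]))
        simp only [List.nil_append] at this
        rw [this]
        simp [mergeL_nil_right]
      | cons r rs' =>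
        by_cases hdr : d < r
        · have := ih ds' (r :: rs') (by simp at hlen ⊢; omega) (fun y hy => h y (by simp [hy]))
          rw [show (r :: rs') ++ [m] = r :: (rs' ++ [m]) by rfl]
          rw [show mergeL (d :: ds') (r :: (rs' ++ [m])) = false :: mergeL ds' (r :: (rs' ++ [m])) by
            rw [mergeL]; simp [hdr]]
          rw [show (r :: rs') ++ [m] = r :: (rs' ++ [m]) by rfl] at this
          rw [this]
          rw [show mergeL (d :: ds') (r :: rs') = false :: mergeL ds' (r :: rs') by
            rw [mergeL]; simp [hdr]]
          rfl
        · have := ih (d :: ds') rs' (by simp at hlen ⊢; omega) h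
          rw [show (r :: rs') ++ [m] = r :: (rs' ++ [m]) by rfl]
          rw [show mergeL (d :: ds') (r :: (rs' ++ [m])) = true :: mergeL (d :: ds') (rs' ++ [m]) by
            rw [mergeL]; simp [hdr]]
          rw [this]
          rw [show mergeL (d :: ds') (r :: rs') = true :: mergeL (d :: ds') rs' by
            rw [mergeL]; simp [hdr]]
          rfl

theorem loopB_cons (x : Bool) (rest : List Bool) :
    loopB (x :: rest) =
      if (x :: rest).contains true && (x :: rest).contains false then
        loopB (rest.erase (!x) ++ [x])
      else if (x :: rest).contains false then "Dire" else "Radiant" := by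
  rw [loopB]
  simp

theorem sim : ∀ (n : Nat) (l : Int) (qd qr : List Int),
    qd.length + qr.length ≤ n → 0 < l →
    qd.Pairwise (· < ·) → qr.Pairwise (· < ·) →
    (∀ a ∈ qd, ∀ b ∈ qr, a ≠ b) →
    (∀ x y : Int, (x ∈ qd ∨ x ∈ qr) → (y ∈ qd ∨ y ∈ qr) → y < x + l) →
    loopA l qd qr = loopB (mergeL qd qr) := by
  intro n
  induction n with
  | zero =>
    intro l qd qr hlen _ _ _ _ _
    have hd : qd = [] := by cases qd <;> simp_all
    have hr : qr = [] := by cases qr <;> simp_all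
    subst hd; subst hr
    simp [loopA, mergeL, loopB]
  | succ n ih =>
    intro l qd qr hlen hl hpd hpr hdis hwin
    cases qd with
    | nil =>
      cases qr with
      | nil => simp [loopA, mergeL, loopB]
      | cons r rs =>
        rw [show loopA l [] (r :: rs) = "Radiant" by rw [loopA]]
        rw [show mergeL [] (r :: rs) = (r :: rs).map (fun _ => true) by rw [mergeL]]
        rw [show (r :: rs).map (fun _ => true) = true :: rs.map (fun _ => true) by rfl]
        rw [loopB_cons]
        simp
    | cons d ds =>
      cases qr with
      | nil =>
        rw [show loopA l (d :: ds) [] = "Dire" by rw [loopA]]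
        rw [mergeL_nil_right]
        rw [show (d :: ds).map (fun _ => false) = false :: ds.map (fun _ => false) by rfl]
        rw [loopB_cons]
        simp
      | cons r rs =>
        have hdr : d ≠ r := hdis d (by simp) r (by simp)
        have hds : ∀ y ∈ ds, d < y := (List.pairwise_cons.mp hpd).1
        have hrs : ∀ y ∈ rs, r < y := (List.pairwise_cons.mp hpr).1
        by_cases hlt : d < r
        · -- Dire front wins
          have hA : loopA l (d :: ds) (r :: rs) = loopA l (ds ++ [d + l]) rs := by
            rw [loopA]; simp [show ¬ d > r by omega]
          have hM : mergeL (d :: ds) (r :: rs) = false :: mergeL ds (r :: rs) := by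
            rw [mergeL]; simp [hlt]
          have hcT : true ∈ mergeL ds (r :: rs) := (mem_true_mergeL ds (r :: rs)).mpr (by simp)
          rw [hA, hM, loopB_cons]
          rw [if_pos (by simp [hcT])]
          rw [show (!false) = true by rfl]
          rw [erase_true_mergeL r ds rs hrs]
          rw [show mergeL ds rs ++ [false] = mergeL (ds ++ [d + l]) rs from
            (mergeL_append_left (d + l) (ds.length + rs.length) ds rs le_rfl
              (fun y hy => hwin d y (Or.inl (by simp)) (Or.inr (by simp [hy])))).symm]
          apply ih l (ds ++ [d + l]) rs (by simp at hlen ⊢; omega) hl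
          · -- Pairwise (ds ++ [d + l])
            rw [List.pairwise_append]
            refine ⟨(List.pairwise_cons.mp hpd).2, by simp, ?_⟩
            intro x hx y hy
            simp at hy; subst hy
            have := hwin d x (Or.inl (by simp)) (Or.inl (by simp [hx]))
            omega
          · exact (List.pairwise_cons.mp hpr).2
          · -- distinct
            intro a ha b hb
            rcases List.mem_append.mp ha with ha' | ha'
            · exact hdis a (by simp [ha']) b (by simp [hb])
            · simp at ha'; subst ha'
              have := hwin d b (Or.inl (by simp)) (Or.inr (by simp [hb]))
              omega
          · -- window
            have hold : ∀ u : Int, (u ∈ ds ∨ u ∈ rs) → d < u ∧ u < d + l := by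
              intro u hu
              constructor
              · rcases hu with hu | hu
                · exact hds u hu
                · have := hrs u hu; omega
              · rcases hu with hu | hu
                · exact hwin d u (Or.inl (by simp)) (Or.inl (by simp [hu]))
                · exact hwin d u (Or.inl (by simp)) (Or.inr (by simp [hu]))
            intro x y hx hy
            have hx' : x ∈ ds ∨ x = d + l ∨ x ∈ rs := by
              rcases hx with hx | hx
              · rcases List.mem_append.mp hx with h' | h'
                · exact Or.inl h'
                · simp at h'; exact Or.inr (Or.inl h')
              · exact Or.inr (Or.inr hx)
            have hy' : y ∈ ds ∨ y = d + l ∨ y ∈ rs := by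
              rcases hy with hy | hy
              · rcases List.mem_append.mp hy with h' | h'
                · exact Or.inl h'
                · simp at h'; exact Or.inr (Or.inl h')
              · exact Or.inr (Or.inr hy)
            rcases hx' with hx' | hx' | hx' <;> rcases hy' with hy' | hy' | hy'
            · exact hwin x y (Or.inl (by simp [hx'])) (Or.inl (by simp [hy']))
            · have := (hold x (Or.inl hx')).1; omega
            · exact hwin x y (Or.inl (by simp [hx'])) (Or.inr (by simp [hy']))
            · have := (hold y (Or.inl hy')).2; omega
            · omega
            · have := (hold y (Or.inr hy')).2; omega
            · exact hwin x y (Or.inr (by simp [hx'])) (Or.inl (by simp [hy']))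
            · have := (hold x (Or.inr hx')).1; omega
            · exact hwin x y (Or.inr (by simp [hx'])) (Or.inr (by simp [hy']))
        · -- Radiant front wins
          have hrd : r < d := by omega
          have hA : loopA l (d :: ds) (r :: rs) = loopA l ds (rs ++ [r + l]) := by
            rw [loopA]; simp [show d > r by omega]
          have hM : mergeL (d :: ds) (r :: rs) = true :: mergeL (d :: ds) rs := by
            rw [mergeL]; simp [hlt]
          have hcF : false ∈ mergeL (d :: ds) rs := (mem_false_mergeL (d :: ds) rs).mpr (by simp)
          rw [hA, hM, loopB_cons]
          rw [if_pos (by simp [hcF])]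
          rw [show (!true) = false by rfl]
          rw [erase_false_mergeL d ds rs hds]
          rw [show mergeL ds rs ++ [true] = mergeL ds (rs ++ [r + l]) from
            (mergeL_append_right (r + l) (ds.length + rs.length) ds rs le_rfl
              (fun y hy => hwin r y (Or.inr (by simp)) (Or.inl (by simp [hy])))).symm]
          apply ih l ds (rs ++ [r + l]) (by simp at hlen ⊢; omega) hl
          · exact (List.pairwise_cons.mp hpd).2
          · rw [List.pairwise_append]
            refine ⟨(List.pairwise_cons.mp hpr).2, by simp, ?_⟩
            intro x hx y hy
            simp at hy; subst hy
            have := hwin r x (Or.inr (by simp)) (Or.inr (by simp [hx]))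
            omega
          · intro a ha b hb
            rcases List.mem_append.mp hb with hb' | hb'
            · exact hdis a (by simp [ha]) b (by simp [hb'])
            · simp at hb'; subst hb'
              have := hwin r a (Or.inr (by simp)) (Or.inl (by simp [ha]))
              omega
          · have hold : ∀ u : Int, (u ∈ ds ∨ u ∈ rs) → r < u ∧ u < r + l := by
              intro u hu
              constructor
              · rcases hu with hu | hu
                · have := hds u hu; omega
                · exact hrs u hu
              · rcases hu with hu | hu
                · exact hwin r u (Or.inr (by simp)) (Or.inl (by simp [hu]))
                · exact hwin r u (Or.inr (by simp)) (Or.inr (by simp [hu]))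
            intro x y hx hy
            have hx' : x ∈ ds ∨ x = r + l ∨ x ∈ rs := by
              rcases hx with hx | hx
              · exact Or.inl hx
              · rcases List.mem_append.mp hx with h' | h'
                · exact Or.inr (Or.inr h')
                · simp at h'; exact Or.inr (Or.inl h')
            have hy' : y ∈ ds ∨ y = r + l ∨ y ∈ rs := by
              rcases hy with hy | hy
              · exact Or.inl hy
              · rcases List.mem_append.mp hy with h' | h'
                · exact Or.inr (Or.inr h')
                · simp at h'; exact Or.inr (Or.inl h')
            rcases hx' with hx' | hx' | hx' <;> rcases hy' with hy' | hy' | hy'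
            · exact hwin x y (Or.inl (by simp [hx'])) (Or.inl (by simp [hy']))
            · have := (hold x (Or.inl hx')).1; omega
            · exact hwin x y (Or.inl (by simp [hx'])) (Or.inr (by simp [hy']))
            · have := (hold y (Or.inl hy')).2; omega
            · omega
            · have := (hold y (Or.inr hy')).2; omega
            · exact hwin x y (Or.inr (by simp [hx'])) (Or.inl (by simp [hy']))
            · have := (hold x (Or.inr hx')).1; omega
            · exact hwin x y (Or.inr (by simp [hx'])) (Or.inr (by simp [hy']))

theorem build : ∀ (cs : List Char) (k : Int) (qd qr : List Int),
    0 ≤ k →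
    (∀ x ∈ qd, 0 ≤ x ∧ x < k) → (∀ x ∈ qr, 0 ≤ x ∧ x < k) →
    qd.Pairwise (· < ·) → qr.Pairwise (· < ·) →
    (∀ a ∈ qd, ∀ b ∈ qr, a ≠ b) →
    (∀ x ∈ ((PySem.List.enumerate cs k).foldl stepA (qd, qr)).1, 0 ≤ x ∧ x < k + cs.length) ∧
    (∀ x ∈ ((PySem.List.enumerate cs k).foldl stepA (qd, qr)).2, 0 ≤ x ∧ x < k + cs.length) ∧
    ((PySem.List.enumerate cs k).foldl stepA (qd, qr)).1.Pairwise (· < ·) ∧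
    ((PySem.List.enumerate cs k).foldl stepA (qd, qr)).2.Pairwise (· < ·) ∧
    (∀ a ∈ ((PySem.List.enumerate cs k).foldl stepA (qd, qr)).1,
      ∀ b ∈ ((PySem.List.enumerate cs k).foldl stepA (qd, qr)).2, a ≠ b) ∧
    mergeL ((PySem.List.enumerate cs k).foldl stepA (qd, qr)).1
           ((PySem.List.enumerate cs k).foldl stepA (qd, qr)).2
      = mergeL qd qr ++ cs.map (fun c => c == 'R') := by
  intro cs
  induction cs with
  | nil =>
    intro k qd qr _ h1 h2 h3 h4 h5
    simp only [PySem.List.enumerate_nil, List.foldl_nil, List.length_nil, List.map_nil,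
      List.append_nil]
    exact ⟨fun x hx => by have := h1 x hx; omega, fun x hx => by have := h2 x hx; omega,
      h3, h4, h5, trivial⟩
  | cons c cs ih =>
    intro k qd qr hk h1 h2 h3 h4 h5
    rw [PySem.List.enumerate_cons, List.foldl_cons]
    by_cases hc : c == 'R'
    · rw [show stepA (qd, qr) (k, c) = (qd, qr ++ [k]) by simp [stepA, hc]]
      have h1' : ∀ x ∈ qd, 0 ≤ x ∧ x < k + 1 := fun x hx => by have := h1 x hx; omega
      have h2' : ∀ x ∈ qr ++ [k], 0 ≤ x ∧ x < k + 1 := by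
        intro x hx
        rcases List.mem_append.mp hx with h' | h'
        · have := h2 x h'; omega
        · simp at h'; omega
      have h4' : (qr ++ [k]).Pairwise (· < ·) := by
        rw [List.pairwise_append]
        exact ⟨h4, by simp, fun x hx y hy => by simp at hy; subst hy; exact (h2 x hx).2⟩
      have h5' : ∀ a ∈ qd, ∀ b ∈ qr ++ [k], a ≠ b := by
        intro a ha b hb
        rcases List.mem_append.mp hb with h' | h'
        · exact h5 a ha b h'
        · simp at h'; subst h'; have := (h1 a ha).2; omega
      obtain ⟨g1, g2, g3, g4, g5, g6⟩ := ih (k + 1) qd (qr ++ [k]) (by omega) h1' h2' h3 h4' h5'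
      refine ⟨fun x hx => by have := g1 x hx; simp; omega,
              fun x hx => by have := g2 x hx; simp; omega, g3, g4, g5, ?_⟩
      rw [g6]
      rw [mergeL_append_right k (qd.length + qr.length) qd qr le_rfl (fun y hy => (h1 y hy).2)]
      simp [hc, List.append_assoc]
    · rw [show stepA (qd, qr) (k, c) = (qd ++ [k], qr) by simp [stepA, hc]]
      have h1' : ∀ x ∈ qd ++ [k], 0 ≤ x ∧ x < k + 1 := by
        intro x hx
        rcases List.mem_append.mp hx with h' | h'
        · have := h1 x h'; omega
        · simp at h'; omega
      have h2' : ∀ x ∈ qr, 0 ≤ x ∧ x < k + 1 := fun x hx => by have := h2 x hx; omega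
      have h3' : (qd ++ [k]).Pairwise (· < ·) := by
        rw [List.pairwise_append]
        exact ⟨h3, by simp, fun x hx y hy => by simp at hy; subst hy; exact (h1 x hx).2⟩
      have h5' : ∀ a ∈ qd ++ [k], ∀ b ∈ qr, a ≠ b := by
        intro a ha b hb
        rcases List.mem_append.mp ha with h' | h'
        · exact h5 a h' b hb
        · simp at h'; subst h'; have := (h2 b hb).2; omega
      obtain ⟨g1, g2, g3, g4, g5, g6⟩ := ih (k + 1) (qd ++ [k]) qr (by omega) h1' h2' h3' h4 h5'
      refine ⟨fun x hx => by have := g1 x hx; simp; omega,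
              fun x hx => by have := g2 x hx; simp; omega, g3, g4, g5, ?_⟩
      rw [g6]
      rw [mergeL_append_left k (qd.length + qr.length) qd qr le_rfl (fun y hy => (h2 y hy).2)]
      simp [hc, List.append_assoc]

-- ===== VERDICT (by name: the statement is the Claim_ definition above) =====
theorem predictPartyVictory_spec : Claim_equal_predictPartyVictory := by
  intro senate _
  unfold Spec_predictPartyVictory predictPartyVictory predictPartyVictory_alt
  by_cases hcs : senate.toList = []
  · simp [hcs, loopA, loopB]
  · obtain ⟨h1, h2, h3, h4, h5, h6⟩ :=
      build senate.toList 0 [] [] le_rfl (by simp) (by simp) (by simp) (by simp) (by simp)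
    have hl : (0 : Int) < senate.toList.length := by
      exact_mod_cast List.length_pos_iff.mpr hcs
    simp only []
    rw [sim (((PySem.List.enumerate senate.toList 0).foldl stepA ([], [])).1.length +
            ((PySem.List.enumerate senate.toList 0).foldl stepA ([], [])).2.length)
          senate.toList.length _ _ le_rfl hl h3 h4 h5 ?_]
    · rw [h6]; simp [mergeL]
    · intro x y hx hy
      have hx' : 0 ≤ x := by
        rcases hx with h | h
        · exact (h1 x h).1
        · exact (h2 x h).1
      have hy' : y < 0 + senate.toList.length := by
        rcases hy with h | h
        · exact (h1 y h).2
        · exact (h2 y h).2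
      omega
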